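-- pv_equiv track=rewrite | github.com/juheon97/coding_practice | 프로그래머스/2/172927. 광물 캐기/광물 캐기.py | solution
-- ===== SOURCE A (Python) =====
-- def solution(picks, minerals):
--     answer = 0
--     mines = 0
--     for i in picks:
--         mines += i * 5
--     #  한 곡갱이 당 5개씩 캘 수 있으므로 곡갱이 갯수로 광물 자르기
--     minerals = minerals[:mines]
--
--     # 한 곡갱이 당 캘수 있는 광물 확인
--     minerals_count = [[0,0,0] for _ in range(len(minerals)// 5 + 1)]
--
--     for i in range(len(minerals)):
--
--         if minerals[i] == "diamond":
--             minerals_count[i//5][0] += 1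
--         elif minerals[i] == "iron":
--             minerals_count[i//5][1] += 1
--         elif minerals[i] == "stone":
--             minerals_count[i//5][2] += 1
--
--     # 다이아가 가장 많은 순서로 sort 진행
--     minerals_count.sort(key = lambda x : (x[0], x[1], x[2]), reverse = True)
--
--     for i in minerals_count:
--
--         dia = i[0]
--         iron = i[1]
--         stone = i[2]
--
--         for j in range(len(picks)):
--             if picks[j] > 0 and j == 0:
--                 answer += dia+iron+stone
--                 picks[j] -= 1
--                 break
--             elif picks[j] > 0 and j == 1:
--                 answer += (dia*5) + iron + stone
--                 picks[j] -= 1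
--                 break
--             elif picks[j] > 0 and j == 2:
--                 answer += (dia*25) + (iron * 5) + stone
--                 picks[j] -= 1
--                 break
--
--     return answer
-- ===== SOURCE B (Python) =====
-- def solution(picks, minerals):
--     # NOTE: unlike the original, this implementation does not mutate `picks`;
--     # the equivalence claimed is about the return value only.
--     ms = minerals[:5 * sum(picks)]
--     # stream the minerals once, flushing a (diamond, iron, stone) triple every 5 items
--     chunks = []
--     d = i = s = 0
--     for idx, m in enumerate(ms):
--         if m == "diamond":
--             d += 1
--         elif m == "iron":
--             i += 1
--         elif m == "stone":
--             s += 1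
--         if idx % 5 == 4:
--             chunks.append((d, i, s))
--             d = i = s = 0
--     if len(ms) % 5:
--         chunks.append((d, i, s))
--     chunks.sort(reverse=True)
--     n = len(chunks)
--     caps = [max(p, 0) for p in picks[:3]]
--     caps += [0] * (3 - len(caps))
--     k0 = min(caps[0], n)
--     k1 = min(caps[0] + caps[1], n)
--     k2 = min(caps[0] + caps[1] + caps[2], n)
--     # fatigue = base cost of every mined chunk plus tier surcharges past each cut point
--     used = chunks[:k2]
--     ans = sum(cd + ci + cs for cd, ci, cs in used)
--     ans += sum(4 * cd for cd, ci, cs in used[k0:])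
--     ans += sum(20 * cd + 4 * ci for cd, ci, cs in used[k1:])
--     return ans
-- ===== Notes on version B (the rewrite author's own statement) =====
-- stated objective: alternative
-- what changed: B streams the minerals once with a running (d,i,s) accumulator flushed every 5 items (no index-addressed count table), and after sorting computes the answer by prefix-cut arithmetic - base cost of all mined chunks plus two tier surcharges (4d past the diamond-pick cut, 20d+4i past the iron-pick cut) over list slices - instead of A's per-chunk scan-and-decrement over the whole picks list; B does not mutate picks (return value proved equal).
import Mathlib
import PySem

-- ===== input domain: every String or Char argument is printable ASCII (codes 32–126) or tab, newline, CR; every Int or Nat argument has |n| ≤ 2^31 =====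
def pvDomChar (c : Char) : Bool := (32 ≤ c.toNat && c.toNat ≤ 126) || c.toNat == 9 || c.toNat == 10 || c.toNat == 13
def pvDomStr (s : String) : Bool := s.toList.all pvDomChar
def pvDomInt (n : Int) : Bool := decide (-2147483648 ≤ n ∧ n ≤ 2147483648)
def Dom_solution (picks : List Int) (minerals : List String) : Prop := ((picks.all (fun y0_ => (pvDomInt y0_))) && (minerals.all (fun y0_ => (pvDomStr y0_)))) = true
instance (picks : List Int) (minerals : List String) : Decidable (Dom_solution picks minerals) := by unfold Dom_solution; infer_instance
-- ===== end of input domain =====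

-- B streams the minerals once with a running accumulator flushed every 5 items and, after the
-- sort, computes the answer by prefix-cut arithmetic (base cost + tier surcharges over slices)
-- instead of A's count table and per-chunk scan-and-decrement over picks (objective: alternative).
-- A mutates `picks` in place (decrements used pickaxes); B does not: the equivalence proved
-- here is about the RETURN value only.

-- Python's 3-tuple sort key compares lexicographically: encoded with toLex.
def pvKey (x : Int × Int × Int) : Lex (Int × Lex (Int × Int)) := toLex (x.1, toLex (x.2.1, x.2.2))

-- ===== PORT A =====
-- `for i in range(len(minerals)): … minerals_count[i//5][c] += 1 …`
def countLoopA : List String → Nat → List (Int × Int × Int) → List (Int × Int × Int)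
  | [], _, mc => mc
  | m :: rest, i, mc =>
    countLoopA rest (i + 1)
      (if m == "diamond" then mc.modify (i / 5) (fun t => (t.1 + 1, t.2.1, t.2.2))
       else if m == "iron" then mc.modify (i / 5) (fun t => (t.1, t.2.1 + 1, t.2.2))
       else if m == "stone" then mc.modify (i / 5) (fun t => (t.1, t.2.1, t.2.2 + 1))
       else mc)

-- `for j in range(len(picks)): if picks[j] > 0 and j == 0: … break …` — returns (answer delta, new picks)
def innerLoopA (dia iron stone : Int) : List Int → Nat → Int × List Int
  | [], _ => (0, [])
  | p :: rest, j =>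
    if p > 0 ∧ j = 0 then (dia + iron + stone, (p - 1) :: rest)
    else if p > 0 ∧ j = 1 then (dia * 5 + iron + stone, (p - 1) :: rest)
    else if p > 0 ∧ j = 2 then (dia * 25 + iron * 5 + stone, (p - 1) :: rest)
    else
      let r := innerLoopA dia iron stone rest (j + 1)
      (r.1, p :: r.2)

-- `for i in minerals_count: …`
def outerLoopA : List (Int × Int × Int) → List Int → Int → Int
  | [], _, ans => ans
  | g :: rest, picks, ans =>
    let r := innerLoopA g.1 g.2.1 g.2.2 picks 0
    outerLoopA rest r.2 (ans + r.1)

def solution (picks : List Int) (minerals : List String) : Int :=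
  let mines := picks.foldl (fun a i => a + i * 5) 0
  let ms := PySem.List.slice minerals none (some mines)
  let mc := countLoopA ms 0 (List.replicate (ms.length / 5 + 1) (0, 0, 0))
  -- minerals_count.sort(key=lambda x: (x[0], x[1], x[2]), reverse=True)
  let mcs := PySem.List.sorted mc pvKey true
  outerLoopA mcs picks 0

-- ===== PORT B =====
-- `for idx, m in enumerate(ms): … if idx % 5 == 4: chunks.append((d,i,s)); d = i = s = 0`
def chunkLoopB : List String → Nat → List (Int × Int × Int) → Int → Int → Int →
    List (Int × Int × Int) × Int × Int × Int
  | [], _, ch, d, i, s => (ch, d, i, s)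
  | m :: rest, idx, ch, d, i, s =>
    let dis : Int × Int × Int :=
      if m == "diamond" then (d + 1, i, s)
      else if m == "iron" then (d, i + 1, s)
      else if m == "stone" then (d, i, s + 1)
      else (d, i, s)
    if idx % 5 = 4 then chunkLoopB rest (idx + 1) (ch ++ [dis]) 0 0 0
    else chunkLoopB rest (idx + 1) ch dis.1 dis.2.1 dis.2.2

def solution_alt (picks : List Int) (minerals : List String) : Int :=
  let ms := PySem.List.slice minerals none (some (5 * picks.sum))
  let r := chunkLoopB ms 0 [] 0 0 0
  -- `if len(ms) % 5: chunks.append((d, i, s))`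
  let chunks0 := if ms.length % 5 ≠ 0 then r.1 ++ [(r.2.1, r.2.2.1, r.2.2.2)] else r.1
  let chunks := PySem.List.sorted chunks0 pvKey true
  let n : Int := chunks.length
  let caps := (PySem.List.slice picks none (some 3)).map (fun p => max p 0) ++
    List.replicate (3 - (PySem.List.slice picks none (some 3)).length) (0 : Int)
  let k0 := min (caps.getD 0 0) n
  let k1 := min (caps.getD 0 0 + caps.getD 1 0) n
  let k2 := min (caps.getD 0 0 + caps.getD 1 0 + caps.getD 2 0) n
  -- base cost of every mined chunk plus tier surcharges past each cut point
  let used := PySem.List.slice chunks none (some k2)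
  let ans := (used.map (fun c => c.1 + c.2.1 + c.2.2)).sum
  let ans := ans + ((PySem.List.slice used (some k0) none).map (fun c => 4 * c.1)).sum
  let ans := ans + ((PySem.List.slice used (some k1) none).map (fun c => 20 * c.1 + 4 * c.2.1)).sum
  ans

-- ===== PRECONDITION & SPEC =====
def Spec_solution (picks : List Int) (minerals : List String) (out : Int) : Prop := out = solution_alt picks minerals
instance (picks : List Int) (minerals : List String) (out : Int) : Decidable (Spec_solution picks minerals out) := by unfold Spec_solution; infer_instance

-- ===== CLAIM (what is proved, stated in full; the proofs are below) =====
def Claim_equal_solution : Prop := ∀ (picks : List Int) (minerals : List String), Dom_solution picks minerals → Spec_solution picks minerals (solution picks minerals)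

-- ===== LEMMAS AND PROOFS =====

-- proof-only: the (diamond, iron, stone) counts of one chunk, and the 5-chunking of a list
def countsB (h : List String) : Int × Int × Int :=
  ((PySem.List.count h "diamond" : Int), (PySem.List.count h "iron" : Int), (PySem.List.count h "stone" : Int))

def chunksB (ms : List String) : List (Int × Int × Int) :=
  if ms.isEmpty then []
  else countsB (ms.take 5) :: chunksB (ms.drop 5)
termination_by ms.length
decreasing_by simp [List.isEmpty_iff] at *; cases ms with
  | nil => simp_all
  | cons a l => simp

def fatv (p : (Int × Int × Int) × (Int × Int × Int)) : Int :=
  p.2.1 * p.1.1 + p.2.2.1 * p.1.2.1 + p.2.2.2 * p.1.2.2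

def zipSum (gs ws : List (Int × Int × Int)) : Int := ((gs.zip ws).map fatv).sum

def assignOf (picks : List Int) : List (Int × Int × Int) :=
  List.replicate (picks.getD 0 0).toNat (1, 1, 1) ++
  List.replicate (picks.getD 1 0).toNat (5, 1, 1) ++
  List.replicate (picks.getD 2 0).toNat (25, 5, 1)

lemma foldl_mul5 (l : List Int) (a : Int) : l.foldl (fun a i => a + i * 5) a = a + l.sum * 5 := by
  induction l generalizing a with
  | nil => simp
  | cons x xs ih => simp [List.foldl, ih, List.sum_cons]; ring

lemma countLoopA_append (xs ys : List String) (i : Nat) (mc : List (Int × Int × Int)) :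
    countLoopA (xs ++ ys) i mc = countLoopA ys (i + xs.length) (countLoopA xs i mc) := by
  induction xs generalizing i mc with
  | nil => simp [countLoopA]
  | cons m rest ih => simp [countLoopA, ih]; ring_nf

lemma modify_zero_comp {α : Type} (mc : List α) (f g : α → α) :
    (mc.modify 0 f).modify 0 g = mc.modify 0 (fun x => g (f x)) := by
  cases mc <;> simp [List.modify]

lemma modify_zero_id {α : Type} (mc : List α) : mc.modify 0 (fun x => x) = mc := by
  cases mc <;> simp [List.modify]

lemma modify_zero_cons {α : Type} (a : α) (l : List α) (f : α → α) :
    (a :: l).modify 0 f = f a :: l := by simp [List.modify]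

lemma modify_succ_cons {α : Type} (a : α) (l : List α) (k : Nat) (f : α → α) :
    (a :: l).modify (k + 1) f = a :: l.modify k f := by simp [List.modify]

lemma countLoopA_small (ms : List String) (i : Nat) (mc : List (Int × Int × Int))
    (h : i + ms.length ≤ 5) :
    countLoopA ms i mc = mc.modify 0 (fun t =>
      (t.1 + (PySem.List.count ms "diamond" : Int),
       t.2.1 + (PySem.List.count ms "iron" : Int),
       t.2.2 + (PySem.List.count ms "stone" : Int))) := by
  induction ms generalizing i mc with
  | nil => simp [countLoopA, PySem.List.count_eq, modify_zero_id]
  | cons m rest ih =>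
    have hi : i / 5 = 0 := by simp at h; omega
    have hrec : i + 1 + rest.length ≤ 5 := by simp at h ⊢; omega
    simp only [countLoopA]
    by_cases hd : m = "diamond"
    · subst hd
      simp only [BEq.rfl, if_true, beq_iff_eq, reduceIte]
      rw [ih (i + 1) _ hrec, hi, modify_zero_comp]
      congr 1; funext t
      simp [PySem.List.count_eq, List.count_cons]
      ring_nf
    · by_cases hr : m = "iron"
      · subst hr
        rw [if_neg (by decide : ¬ (("iron" : String) == "diamond") = true),
          if_pos (by decide : (("iron" : String) == "iron") = true)]
        rw [ih (i + 1) _ hrec, hi, modify_zero_comp]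
        congr 1; funext t
        simp [PySem.List.count_eq, List.count_cons]
        ring_nf
      · by_cases hs : m = "stone"
        · subst hs
          rw [if_neg (by decide : ¬ (("stone" : String) == "diamond") = true),
            if_neg (by decide : ¬ (("stone" : String) == "iron") = true),
            if_pos (by decide : (("stone" : String) == "stone") = true)]
          rw [ih (i + 1) _ hrec, hi, modify_zero_comp]
          congr 1; funext t
          simp [PySem.List.count_eq, List.count_cons]
          ring_nf
        · simp only [beq_iff_eq, hd, hr, hs, if_false, reduceIte]
          rw [ih (i + 1) _ hrec]
          congr 1; funext t
          simp [PySem.List.count_eq, List.count_cons, hd, hr, hs]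

lemma countLoopA_shift (ms : List String) (i : Nat) (c : Int × Int × Int)
    (rest : List (Int × Int × Int)) :
    countLoopA ms (i + 5) (c :: rest) = c :: countLoopA ms i rest := by
  induction ms generalizing i c rest with
  | nil => simp [countLoopA]
  | cons m tl ih =>
    have hi : (i + 5) / 5 = i / 5 + 1 := by omega
    have hadd : i + 5 + 1 = i + 1 + 5 := by omega
    simp only [countLoopA, hi, modify_succ_cons, hadd]
    split_ifs <;> exact ih _ _ _

lemma chunksB_cons (ms : List String) (h : ms ≠ []) :
    chunksB ms = countsB (ms.take 5) :: chunksB (ms.drop 5) := by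
  rw [chunksB]; simp [List.isEmpty_iff, h]

theorem countLoopA_chunks (ms : List String) (n : Nat) (h : (ms.length + 4) / 5 ≤ n) :
    countLoopA ms 0 (List.replicate n (0, 0, 0)) =
      chunksB ms ++ List.replicate (n - (ms.length + 4) / 5) (0, 0, 0) := by
  by_cases hms : ms = []
  · subst hms
    simp [countLoopA, chunksB]
  · have hlen : 0 < ms.length := List.length_pos_iff.2 hms
    obtain ⟨n', rfl⟩ : ∃ n', n = n' + 1 := ⟨n - 1, by omega⟩
    have htk : (0 : Nat) + (ms.take 5).length ≤ 5 := by simp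
    conv_lhs => rw [← List.take_append_drop 5 ms]
    rw [countLoopA_append, countLoopA_small _ _ _ htk, List.replicate_succ, modify_zero_cons]
    have hcounts : ((0 : Int) + (PySem.List.count (ms.take 5) "diamond" : Int),
        (0 : Int) + (PySem.List.count (ms.take 5) "iron" : Int),
        (0 : Int) + (PySem.List.count (ms.take 5) "stone" : Int)) = countsB (ms.take 5) := by
      simp [countsB]
    rw [hcounts, chunksB_cons ms hms]
    by_cases hsmall : ms.length ≤ 5
    · have hdrop : ms.drop 5 = [] := by
        apply List.eq_nil_of_length_eq_zero; simp; omega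
      have hdiv : (ms.length + 4) / 5 = 1 := by omega
      rw [hdrop]
      simp [countLoopA, chunksB, hdiv]
    · have htklen : (ms.take 5).length = 5 := by simp; omega
      rw [htklen]
      rw [show (0 : Nat) + 5 = 0 + 5 from rfl, countLoopA_shift]
      have hrec := countLoopA_chunks (ms.drop 5) n' (by simp; omega)
      rw [hrec]
      have hd : (ms.drop 5).length = ms.length - 5 := by simp
      have hcnt : n' - ((ms.drop 5).length + 4) / 5 = n' + 1 - (ms.length + 4) / 5 := by
        rw [hd]; omega
      rw [hcnt]
      simp
termination_by ms.length
decreasing_by simp; omega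

lemma chunksB_nonneg (ms : List String) :
    ∀ g ∈ chunksB ms, 0 ≤ g.1 ∧ 0 ≤ g.2.1 ∧ 0 ≤ g.2.2 := by
  induction ms using chunksB.induct with
  | case1 ms hms => rw [chunksB]; simp [hms]
  | case2 ms hms ih =>
    rw [chunksB]; simp only [hms, if_false, Bool.false_eq_true]
    intro g hg
    rcases List.mem_cons.1 hg with hg | hg
    · subst hg; refine ⟨?_, ?_, ?_⟩ <;> simp [countsB]
    · exact ih g hg

lemma sorted_append_zero (gs : List (Int × Int × Int))
    (h : ∀ g ∈ gs, 0 ≤ g.1 ∧ 0 ≤ g.2.1 ∧ 0 ≤ g.2.2) :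
    PySem.List.sorted (gs ++ [((0 : Int), (0 : Int), (0 : Int))]) pvKey true =
      PySem.List.sorted gs pvKey true ++ [(0, 0, 0)] := by
  rw [PySem.List.sorted_rev_eq_foldl_insertBy, List.foldl_append]
  simp only [List.foldl_cons, List.foldl_nil]
  rw [← PySem.List.sorted_rev_eq_foldl_insertBy]
  apply PySem.List.insertBy_of_forall_not_before
  intro y hy
  have hy' := (PySem.List.mem_sorted gs pvKey true y).1 hy
  obtain ⟨h1, h2, h3⟩ := h y hy'
  simp only [decide_eq_false_iff_not]
  intro hlt
  rcases Prod.Lex.lt_iff.1 hlt with hlt1 | ⟨_, hlt2⟩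
  · exact absurd hlt1 (by simp [pvKey]; omega)
  · rcases Prod.Lex.lt_iff.1 hlt2 with hlt3 | ⟨_, hlt4⟩
    · exact absurd hlt3 (by simp [pvKey] at *; omega)
    · exact absurd hlt4 (by simp [pvKey] at *; omega)

lemma innerLoopA_ge3 (d r s : Int) (ps : List Int) (j : Nat) (h : 3 ≤ j) :
    innerLoopA d r s ps j = (0, ps) := by
  induction ps generalizing j with
  | nil => simp [innerLoopA]
  | cons p rest ih =>
    have h0 : ¬ (p > 0 ∧ j = 0) := by omega
    have h1 : ¬ (p > 0 ∧ j = 1) := by omega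
    have h2 : ¬ (p > 0 ∧ j = 2) := by omega
    simp [innerLoopA, h0, h1, h2, ih (j + 1) (by omega)]

lemma replicate_pos (k : Int) (w : Int × Int × Int) (h : 0 < k) :
    List.replicate k.toNat w = w :: List.replicate (k - 1).toNat w := by
  have : k.toNat = (k - 1).toNat + 1 := by omega
  rw [this, List.replicate_succ]

lemma replicate_nonpos (k : Int) (w : Int × Int × Int) (h : k ≤ 0) :
    List.replicate k.toNat w = [] := by
  have : k.toNat = 0 := by omega
  rw [this, List.replicate_zero]

lemma innerA_fst (d r s : Int) (ps : List Int) :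
    (innerLoopA d r s ps 0).1 =
      match assignOf ps with
      | [] => 0
      | w :: _ => w.1 * d + w.2.1 * r + w.2.2 * s := by
  rcases ps with _ | ⟨p0, _ | ⟨p1, _ | ⟨p2, rest⟩⟩⟩ <;>
    simp only [innerLoopA, assignOf] <;>
    [skip; by_cases h0 : p0 > 0; by_cases h0 : p0 > 0; by_cases h0 : p0 > 0]
  · simp
  · simp [h0, replicate_pos p0 _ h0]
  · simp [h0, replicate_nonpos p0 _ (by omega), innerLoopA]
  · simp [h0, replicate_pos p0 _ h0]
  · by_cases h1 : p1 > 0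
    · simp [h0, h1, innerLoopA, replicate_nonpos p0 _ (by omega), replicate_pos p1 _ h1]; ring
    · simp [h0, h1, innerLoopA, replicate_nonpos p0 _ (by omega),
        replicate_nonpos p1 _ (by omega)]
  · simp [h0, replicate_pos p0 _ h0]
  · by_cases h1 : p1 > 0
    · simp [h0, h1, innerLoopA, replicate_nonpos p0 _ (by omega), replicate_pos p1 _ h1]; ring
    · by_cases h2 : p2 > 0
      · simp [h0, h1, h2, innerLoopA, replicate_nonpos p0 _ (by omega),
          replicate_nonpos p1 _ (by omega), replicate_pos p2 _ h2]; ring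
      · simp [h0, h1, h2, innerLoopA, replicate_nonpos p0 _ (by omega),
          replicate_nonpos p1 _ (by omega), replicate_nonpos p2 _ (by omega),
          innerLoopA_ge3 d r s rest 3 (by omega)]

lemma innerA_snd (d r s : Int) (ps : List Int) :
    assignOf (innerLoopA d r s ps 0).2 = (assignOf ps).tail := by
  rcases ps with _ | ⟨p0, _ | ⟨p1, _ | ⟨p2, rest⟩⟩⟩ <;>
    simp only [innerLoopA, assignOf] <;>
    [skip; by_cases h0 : p0 > 0; by_cases h0 : p0 > 0; by_cases h0 : p0 > 0]
  · simp
  · simp [h0, replicate_pos p0 _ h0, assignOf]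
  · simp [h0, replicate_nonpos p0 _ (by omega), innerLoopA, assignOf]
  · simp [h0, replicate_pos p0 _ h0, assignOf]
  · by_cases h1 : p1 > 0
    · simp [h0, h1, innerLoopA, replicate_nonpos p0 _ (by omega), replicate_pos p1 _ h1,
        assignOf]
    · simp [h0, h1, innerLoopA, replicate_nonpos p0 _ (by omega),
        replicate_nonpos p1 _ (by omega), assignOf]
  · simp [h0, replicate_pos p0 _ h0, assignOf]
  · by_cases h1 : p1 > 0
    · simp [h0, h1, innerLoopA, replicate_nonpos p0 _ (by omega), replicate_pos p1 _ h1,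
        assignOf]
    · by_cases h2 : p2 > 0
      · simp [h0, h1, h2, innerLoopA, replicate_nonpos p0 _ (by omega),
          replicate_nonpos p1 _ (by omega), replicate_pos p2 _ h2,
          innerLoopA_ge3 d r s rest 3 (by omega), assignOf]
      · simp [h0, h1, h2, innerLoopA, replicate_nonpos p0 _ (by omega),
          replicate_nonpos p1 _ (by omega), replicate_nonpos p2 _ (by omega),
          innerLoopA_ge3 d r s rest 3 (by omega), assignOf]

lemma outerA (gs : List (Int × Int × Int)) (ps : List Int) (ans : Int) :
    outerLoopA gs ps ans = ans + zipSum gs (assignOf ps) := by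
  induction gs generalizing ps ans with
  | nil => simp [outerLoopA, zipSum]
  | cons g gt ih =>
    simp only [outerLoopA]
    rw [ih, innerA_snd]
    have hf := innerA_fst g.1 g.2.1 g.2.2 ps
    cases hA : assignOf ps with
    | nil => rw [hA] at hf; simp [hA, hf, zipSum]
    | cons w ws =>
      rw [hA] at hf
      simp only [hA, List.tail_cons]
      simp only [zipSum, List.zip_cons_cons, List.map_cons, List.sum_cons, fatv] at *
      rw [hf]; ring

lemma zipSum_append_zero (gs ws : List (Int × Int × Int)) :
    zipSum (gs ++ [(0, 0, 0)]) ws = zipSum gs ws := by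
  induction gs generalizing ws with
  | nil => cases ws <;> simp [zipSum, fatv]
  | cons g gt ih =>
    cases ws with
    | nil => simp [zipSum]
    | cons w wt => simp [zipSum, List.zip, fatv] at *; simp [ih]

-- ===== B-side lemmas =====

lemma chunkLoopB_append (xs ys : List String) (idx : Nat) (ch : List (Int × Int × Int))
    (d i s : Int) :
    chunkLoopB (xs ++ ys) idx ch d i s =
      chunkLoopB ys (idx + xs.length) (chunkLoopB xs idx ch d i s).1
        (chunkLoopB xs idx ch d i s).2.1 (chunkLoopB xs idx ch d i s).2.2.1
        (chunkLoopB xs idx ch d i s).2.2.2 := by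
  induction xs generalizing idx ch d i s with
  | nil => simp [chunkLoopB]
  | cons m rest ih =>
    simp only [List.cons_append, chunkLoopB, List.length_cons]
    have harith : idx + 1 + rest.length = idx + (rest.length + 1) := by omega
    split_ifs with h <;> rw [ih, harith]

lemma chunkLoopB_small (xs : List String) (idx : Nat) (ch : List (Int × Int × Int))
    (d i s : Int) (h : idx % 5 + xs.length ≤ 4) :
    chunkLoopB xs idx ch d i s =
      (ch, d + (PySem.List.count xs "diamond" : Int),
        i + (PySem.List.count xs "iron" : Int), s + (PySem.List.count xs "stone" : Int)) := by
  induction xs generalizing idx ch d i s with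
  | nil => simp [chunkLoopB, PySem.List.count_eq]
  | cons m rest ih =>
    have h4 : ¬ idx % 5 = 4 := by simp at h; omega
    have hrec : (idx + 1) % 5 + rest.length ≤ 4 := by simp at h ⊢; omega
    simp only [chunkLoopB, h4, if_false, reduceIte]
    by_cases hd : m = "diamond"
    · subst hd
      rw [if_pos (by decide : (("diamond" : String) == "diamond") = true)]
      rw [ih _ _ _ _ _ hrec]
      simp [PySem.List.count_eq]
      omega
    · by_cases hr : m = "iron"
      · subst hr
        rw [if_neg (by decide : ¬ (("iron" : String) == "diamond") = true),
          if_pos (by decide : (("iron" : String) == "iron") = true)]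
        rw [ih _ _ _ _ _ hrec]
        simp [PySem.List.count_eq]
        omega
      · by_cases hs : m = "stone"
        · subst hs
          rw [if_neg (by decide : ¬ (("stone" : String) == "diamond") = true),
            if_neg (by decide : ¬ (("stone" : String) == "iron") = true),
            if_pos (by decide : (("stone" : String) == "stone") = true)]
          rw [ih _ _ _ _ _ hrec]
          simp [PySem.List.count_eq]
          omega
        · simp only [beq_iff_eq, hd, hr, hs, if_false, reduceIte]
          rw [ih _ _ _ _ _ hrec]
          simp [PySem.List.count_eq, List.count_cons, hd, hr, hs]

lemma chunkLoopB_five (xs : List String) (idx : Nat) (ch : List (Int × Int × Int))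
    (h5 : xs.length = 5) (h0 : idx % 5 = 0) :
    chunkLoopB xs idx ch 0 0 0 = (ch ++ [countsB xs], 0, 0, 0) := by
  have hl1 : (xs.drop 4).length = 1 := by simp [h5]
  obtain ⟨m, hm⟩ := List.length_eq_one_iff.mp hl1
  have htk : (xs.take 4).length = 4 := by simp [h5]
  conv_lhs => rw [← List.take_append_drop 4 xs]
  rw [chunkLoopB_append, chunkLoopB_small (xs.take 4) idx ch 0 0 0 (by omega)]
  simp only [htk, hm]
  have h4 : (idx + 4) % 5 = 4 := by omega
  simp only [chunkLoopB, h4, if_pos rfl, reduceIte]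
  have hxs : xs = xs.take 4 ++ [m] := by rw [← hm, List.take_append_drop]
  congr 1
  conv_rhs => rw [hxs]
  by_cases hd : m = "diamond"
  · subst hd
    simp [countsB, PySem.List.count_eq, List.count_append, List.count_cons]
  · by_cases hr : m = "iron"
    · subst hr
      rw [if_neg (by decide : ¬ (("iron" : String) == "diamond") = true),
        if_pos (by decide : (("iron" : String) == "iron") = true)]
      simp [countsB, PySem.List.count_eq, List.count_append, List.count_cons]
    · by_cases hs : m = "stone"
      · subst hs
        rw [if_neg (by decide : ¬ (("stone" : String) == "diamond") = true),
          if_neg (by decide : ¬ (("stone" : String) == "iron") = true),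
          if_pos (by decide : (("stone" : String) == "stone") = true)]
        simp [countsB, PySem.List.count_eq, List.count_append, List.count_cons]
      · simp only [beq_iff_eq, hd, hr, hs, if_false, reduceIte]
        simp [countsB, PySem.List.count_eq, List.count_append, List.count_cons, hd, hr, hs]

theorem chunkLoopB_chunks (ms : List String) (idx : Nat) (ch : List (Int × Int × Int))
    (h0 : idx % 5 = 0) :
    (if ms.length % 5 ≠ 0 then
        (chunkLoopB ms idx ch 0 0 0).1 ++ [((chunkLoopB ms idx ch 0 0 0).2.1,
          (chunkLoopB ms idx ch 0 0 0).2.2.1, (chunkLoopB ms idx ch 0 0 0).2.2.2)]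
      else (chunkLoopB ms idx ch 0 0 0).1) = ch ++ chunksB ms := by
  by_cases hms : ms = []
  · subst hms
    simp only [chunkLoopB, List.length_nil]
    rw [chunksB]; simp
  · have hlen : 0 < ms.length := List.length_pos_iff.2 hms
    by_cases hlt : ms.length < 5
    · rw [chunkLoopB_small ms idx ch 0 0 0 (by omega)]
      have hmod : ms.length % 5 ≠ 0 := by omega
      simp only [hmod, not_false_eq_true, if_true, reduceIte]
      rw [chunksB_cons ms hms]
      have ht : ms.take 5 = ms := List.take_of_length_le (by omega)
      have hdp : ms.drop 5 = [] := List.eq_nil_of_length_eq_zero (by simp; omega)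
      rw [ht, hdp, chunksB]
      simp [countsB, hmod]
    · have hsplit : chunkLoopB ms idx ch 0 0 0 =
          chunkLoopB (ms.drop 5) (idx + 5) (ch ++ [countsB (ms.take 5)]) 0 0 0 := by
        conv_lhs => rw [← List.take_append_drop 5 ms]
        rw [chunkLoopB_append, chunkLoopB_five (ms.take 5) idx ch (by simp; omega) h0]
        simp [List.length_take]
        congr 1
        omega
      rw [hsplit]
      have hrec := chunkLoopB_chunks (ms.drop 5) (idx + 5) (ch ++ [countsB (ms.take 5)])
        (by omega)
      have hm5 : (ms.drop 5).length % 5 = ms.length % 5 := by simp; omega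
      rw [hm5] at hrec
      rw [hrec, chunksB_cons ms hms]
      simp
termination_by ms.length
decreasing_by simp; omega

lemma zipSum_cons (g : Int × Int × Int) (gs : List (Int × Int × Int)) (w : Int × Int × Int)
    (ws : List (Int × Int × Int)) :
    zipSum (g :: gs) (w :: ws) = fatv (g, w) + zipSum gs ws := by
  simp [zipSum]

theorem zipSum_reps (gs : List (Int × Int × Int)) (a b c : Nat) :
    zipSum gs (List.replicate a ((1 : Int), (1 : Int), (1 : Int)) ++
      List.replicate b (5, 1, 1) ++ List.replicate c (25, 5, 1)) =
      ((gs.take (a + b + c)).map (fun g => g.1 + g.2.1 + g.2.2)).sum +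
      (((gs.take (a + b + c)).drop a).map (fun g => 4 * g.1)).sum +
      (((gs.take (a + b + c)).drop (a + b)).map (fun g => 20 * g.1 + 4 * g.2.1)).sum := by
  induction gs generalizing a b c with
  | nil => simp [zipSum]
  | cons g gs ih =>
    cases a with
    | succ a' =>
      have h1 : a' + 1 + b + c = (a' + b + c) + 1 := by omega
      have h2 : a' + 1 + b = (a' + b) + 1 := by omega
      rw [h1, h2, List.replicate_succ, List.cons_append, List.cons_append, zipSum_cons,
        List.take_succ_cons, List.drop_succ_cons, List.drop_succ_cons, ih]
      simp only [List.map_cons, List.sum_cons, fatv]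
      ring
    | zero =>
      cases b with
      | succ b' =>
        simp only [List.replicate_zero, List.nil_append, List.replicate_succ, List.cons_append]
        rw [zipSum_cons]
        have h1 : 0 + (b' + 1) + c = (b' + c) + 1 := by omega
        have h2 : (0 : Nat) + (b' + 1) = b' + 1 := by omega
        rw [h1, h2, List.take_succ_cons, List.drop_zero, List.drop_succ_cons]
        have ihb := ih 0 b' c
        simp only [List.replicate_zero, List.nil_append, Nat.zero_add, List.drop_zero] at ihb
        rw [ihb]
        simp only [List.map_cons, List.sum_cons, fatv]
        ring
      | zero =>
        cases c with
        | succ c' =>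
          simp only [List.replicate_zero, List.nil_append, List.replicate_succ]
          rw [zipSum_cons]
          have h1 : 0 + 0 + (c' + 1) = c' + 1 := by omega
          rw [h1, List.take_succ_cons]
          simp only [Nat.zero_add, Nat.add_zero, List.drop_zero]
          have ihc := ih 0 0 c'
          simp only [List.replicate_zero, List.nil_append, Nat.zero_add, Nat.add_zero,
            List.drop_zero] at ihc
          rw [ihc]
          simp only [List.map_cons, List.sum_cons, fatv]
          ring
        | zero => simp [zipSum]

lemma take_minN {α : Type} (l : List α) (a : Nat) : l.take (min a l.length) = l.take a := by
  rcases le_total a l.length with h | h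
  · rw [min_eq_left h]
  · rw [min_eq_right h, List.take_length, List.take_of_length_le h]

lemma drop_minN {α : Type} (l : List α) (a n : Nat) (h : l.length ≤ n) :
    l.drop (min a n) = l.drop a := by
  rcases le_total a n with h1 | h1
  · rw [min_eq_left h1]
  · rw [min_eq_right h1, List.drop_eq_nil_of_le h, List.drop_eq_nil_of_le (le_trans h h1)]

lemma caps_spec (picks : List Int) :
    ((PySem.List.slice picks none (some 3)).map (fun p => max p 0) ++
      List.replicate (3 - (PySem.List.slice picks none (some 3)).length) (0 : Int)).getD 0 0 =
        max (picks.getD 0 0) 0 ∧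
    ((PySem.List.slice picks none (some 3)).map (fun p => max p 0) ++
      List.replicate (3 - (PySem.List.slice picks none (some 3)).length) (0 : Int)).getD 1 0 =
        max (picks.getD 1 0) 0 ∧
    ((PySem.List.slice picks none (some 3)).map (fun p => max p 0) ++
      List.replicate (3 - (PySem.List.slice picks none (some 3)).length) (0 : Int)).getD 2 0 =
        max (picks.getD 2 0) 0 := by
  rw [PySem.List.slice_to picks (by norm_num : (0 : Int) ≤ 3)]
  rcases picks with _ | ⟨p0, _ | ⟨p1, _ | ⟨p2, r⟩⟩⟩ <;> simp [List.take, List.getD]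

-- B's slice-sum formula over S equals zipping S against the replicate weight list.
lemma B_eval (S : List (Int × Int × Int)) (c0 c1 c2 : Int) (h0 : 0 ≤ c0) (h1 : 0 ≤ c1)
    (h2 : 0 ≤ c2) :
    ((PySem.List.slice S none (some (min (c0 + c1 + c2) (S.length : Int)))).map
        (fun c => c.1 + c.2.1 + c.2.2)).sum +
      ((PySem.List.slice (PySem.List.slice S none (some (min (c0 + c1 + c2) (S.length : Int))))
          (some (min c0 (S.length : Int))) none).map (fun c => 4 * c.1)).sum +
      ((PySem.List.slice (PySem.List.slice S none (some (min (c0 + c1 + c2) (S.length : Int))))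
          (some (min (c0 + c1) (S.length : Int))) none).map
            (fun c => 20 * c.1 + 4 * c.2.1)).sum =
      zipSum S (List.replicate c0.toNat (1, 1, 1) ++ List.replicate c1.toNat (5, 1, 1) ++
        List.replicate c2.toNat (25, 5, 1)) := by
  rw [zipSum_reps]
  rw [PySem.List.slice_to S (by omega),
    PySem.List.slice_from _ (by omega : (0 : Int) ≤ min c0 (S.length : Int)),
    PySem.List.slice_from _ (by omega : (0 : Int) ≤ min (c0 + c1) (S.length : Int))]
  have e2 : (min (c0 + c1 + c2) (S.length : Int)).toNat =
      min (c0.toNat + c1.toNat + c2.toNat) S.length := by omega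
  have e0 : (min c0 (S.length : Int)).toNat = min c0.toNat S.length := by omega
  have e1 : (min (c0 + c1) (S.length : Int)).toNat = min (c0.toNat + c1.toNat) S.length := by
    omega
  rw [e2, e0, e1, take_minN]
  have hle : (S.take (c0.toNat + c1.toNat + c2.toNat)).length ≤ S.length := by
    simp [List.length_take]
  rw [drop_minN _ _ _ hle, drop_minN _ _ _ hle]

-- ===== VERDICT (by name: the statement is the Claim_ definition above) =====
theorem solution_spec : Claim_equal_solution := by
  unfold Claim_equal_solution
  intro picks minerals _
  unfold Spec_solution solution solution_alt
  simp only []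
  rw [foldl_mul5, zero_add, mul_comm (5 : Int) picks.sum]
  set ms := PySem.List.slice minerals none (some (picks.sum * 5)) with hms
  rw [countLoopA_chunks ms (ms.length / 5 + 1) (by omega)]
  have hch := chunkLoopB_chunks ms 0 [] (by omega)
  rw [List.nil_append] at hch
  rw [hch]
  obtain ⟨hc0, hc1, hc2⟩ := caps_spec picks
  rw [hc0, hc1, hc2]
  rw [B_eval _ _ _ _ (by omega) (by omega) (by omega)]
  have hsplit : ms.length / 5 + 1 - (ms.length + 4) / 5 = 0 ∨
      ms.length / 5 + 1 - (ms.length + 4) / 5 = 1 := by omega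
  have hrep : List.replicate (max (picks.getD 0 0) 0).toNat ((1 : Int), (1 : Int), (1 : Int)) ++
      List.replicate (max (picks.getD 1 0) 0).toNat (5, 1, 1) ++
      List.replicate (max (picks.getD 2 0) 0).toNat (25, 5, 1) = assignOf picks := by
    have e0 : (max (picks.getD 0 0) 0).toNat = (picks.getD 0 0).toNat := by omega
    have e1 : (max (picks.getD 1 0) 0).toNat = (picks.getD 1 0).toNat := by omega
    have e2 : (max (picks.getD 2 0) 0).toNat = (picks.getD 2 0).toNat := by omega
    unfold assignOf
    rw [e0, e1, e2]
  rw [hrep]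
  rcases hsplit with hz | hz
  · rw [hz, List.replicate_zero, List.append_nil, outerA, zero_add]
  · rw [hz, List.replicate_succ, List.replicate_zero]
    rw [sorted_append_zero (chunksB ms) (chunksB_nonneg ms), outerA, zero_add,
      zipSum_append_zero]
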